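-- pv_equiv track=rewrite | github.com/jskim7018/leetcode_study | algorithm_study/2025/12/20251216/medium/LC_3730.py | maxCaloriesBurnt
-- ===== SOURCE A (Python) =====
-- from typing import List
--
-- def maxCaloriesBurnt(heights: List[int]) -> int:
--     n = len(heights)
--
--     heights.sort(reverse=True)
--
--     max_group = []
--     min_group = []
--
--     if n % 2 == 0:
--         maxim_size = n//2
--     else:
--         maxim_size = n//2 + 1
--
--     for i in range(maxim_size):
--         max_group.append(heights[i])
--     for i in range(maxim_size, n):
--         min_group.append(heights[i])
--
--     min_group.sort()
--
--     curr = 0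
--     ans = 0
--     max_idx = 0
--     min_idx = 0
--
--     while max_idx < len(max_group) \
--         or min_idx < len(min_group):
--         if max_idx < len(max_group):
--             ans += (max_group[max_idx] - curr) ** 2
--             curr = max_group[max_idx]
--             max_idx += 1
--         if min_idx < len(min_group):
--             ans += (min_group[min_idx] - curr) ** 2
--             curr = min_group[min_idx]
--             min_idx += 1
--
--     return ans
-- ===== SOURCE B (Python) =====
-- from typing import List
--
-- def maxCaloriesBurnt(heights: List[int]) -> int:
--     # same in-place mutation as A: heights ends up sorted descending
--     heights.sort(reverse=True)
--     n = len(heights)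
--     if n == 0:
--         return 0
--     # closed-form pair sums over the sorted array: no groups, no interleaved
--     # sequence.  The optimal zigzag pairs index j with index n-1-j, so the
--     # answer is heights[0]^2 plus the squared gaps of the pairs (j, n-1-j)
--     # and (j+1, n-1-j).
--     ans = heights[0] ** 2
--     for j in range(n // 2):
--         ans += (heights[j] - heights[n - 1 - j]) ** 2
--     for j in range((n - 1) // 2):
--         ans += (heights[j + 1] - heights[n - 1 - j]) ** 2
--     return ans
-- ===== Notes on version B (the rewrite author's own statement) =====
-- stated objective: alternative
-- what changed: A splits the descending-sorted list into a max group and a re-sorted min group and simulates the zigzag walk with a two-index while loop carrying the previous element; B never builds groups or a sequence at all: it computes the answer directly from the sorted array as heights[0]^2 plus two index-formula sums of squared gaps between positions (j, n-1-j) and (j+1, n-1-j).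
import Mathlib
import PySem

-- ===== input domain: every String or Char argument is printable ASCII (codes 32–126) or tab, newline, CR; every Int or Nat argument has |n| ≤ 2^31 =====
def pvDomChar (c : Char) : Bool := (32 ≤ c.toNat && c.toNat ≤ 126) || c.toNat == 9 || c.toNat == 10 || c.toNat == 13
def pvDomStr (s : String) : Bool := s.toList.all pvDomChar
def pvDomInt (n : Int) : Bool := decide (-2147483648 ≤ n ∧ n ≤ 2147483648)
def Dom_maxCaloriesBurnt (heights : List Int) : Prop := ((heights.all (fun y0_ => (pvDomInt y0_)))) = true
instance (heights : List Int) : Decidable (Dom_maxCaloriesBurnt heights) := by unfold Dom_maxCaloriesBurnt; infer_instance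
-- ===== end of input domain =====

-- B computes the answer directly from the descending-sorted array as heights[0]^2 plus
-- two index-formula sums of squared gaps between positions (j, n-1-j) and (j+1, n-1-j),
-- instead of A's group split + two-index while-loop walk; in Python both sort the
-- argument descending in place, and the equivalence proved here is about the return value.

-- ===== PORT A =====
-- the while loop of A: consumes max_group and min_group alternately, carrying curr and ans
def pvLoopA : List Int → List Int → Int → Int → Int
  | [], [], _, ans => ans
  | [], k :: ks, curr, ans => pvLoopA [] ks k (ans + (k - curr) ^ 2)
  | m :: ms, [], curr, ans => pvLoopA ms [] m (ans + (m - curr) ^ 2)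
  | m :: ms, k :: ks, curr, ans =>
      pvLoopA ms ks k ((ans + (m - curr) ^ 2) + (k - m) ^ 2)

def maxCaloriesBurnt (heights : List Int) : Int :=
  let n : Int := heights.length
  let hs := PySem.List.sorted heights (fun x => x) true
  let maximSize : Int :=
    if PySem.Int.mod n 2 = 0 then PySem.Int.floordiv n 2 else PySem.Int.floordiv n 2 + 1
  let maxGroup := (PySem.List.pyRange 0 maximSize 1).foldl
      (fun acc i => acc ++ [PySem.List.pyGetD hs i 0]) []
  let minGroup := (PySem.List.pyRange maximSize n 1).foldl
      (fun acc i => acc ++ [PySem.List.pyGetD hs i 0]) []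
  let minGroup := PySem.List.sorted minGroup (fun x => x) false
  pvLoopA maxGroup minGroup 0 0

-- ===== PORT B =====
def maxCaloriesBurnt_alt (heights : List Int) : Int :=
  let hs := PySem.List.sorted heights (fun x => x) true
  let n : Int := hs.length
  if n = 0 then 0
  else
    let ans := (PySem.List.pyGetD hs 0 0) ^ 2
    let ans := (PySem.List.pyRange 0 (PySem.Int.floordiv n 2) 1).foldl
        (fun a j => a + (PySem.List.pyGetD hs j 0 - PySem.List.pyGetD hs (n - 1 - j) 0) ^ 2) ans
    (PySem.List.pyRange 0 (PySem.Int.floordiv (n - 1) 2) 1).foldl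
        (fun a j => a + (PySem.List.pyGetD hs (j + 1) 0 - PySem.List.pyGetD hs (n - 1 - j) 0) ^ 2) ans

-- ===== PRECONDITION & SPEC =====
def Spec_maxCaloriesBurnt (heights : List Int) (out : Int) : Prop := out = maxCaloriesBurnt_alt heights
instance (heights : List Int) (out : Int) : Decidable (Spec_maxCaloriesBurnt heights out) := by unfold Spec_maxCaloriesBurnt; infer_instance

-- ===== CLAIM (what is proved, stated in full; the proofs are below) =====
def Claim_equal_maxCaloriesBurnt : Prop := ∀ (heights : List Int), Dom_maxCaloriesBurnt heights → Spec_maxCaloriesBurnt heights (maxCaloriesBurnt heights)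

-- ===== LEMMAS AND PROOFS =====

-- the interleaving of the two groups in A's consumption order
def pvIlv : List Int → List Int → List Int
  | [], ys => ys
  | x :: xs, [] => x :: pvIlv xs []
  | x :: xs, y :: ys => x :: y :: pvIlv xs ys

-- sum of squared consecutive differences starting from prev
def pvSumSq : Int → List Int → Int
  | _, [] => 0
  | prev, h :: t => (h - prev) ^ 2 + pvSumSq h t

-- sum of squared gaps over a list of pairs
def pvS (l : List (Int × Int)) : Int := (l.map (fun p => (p.1 - p.2) ^ 2)).sum

-- the head contribution (x - prev)^2, or 0 for the empty list
def pvHd (f : List Int) (prev : Int) : Int := match f with | [] => 0 | x :: _ => (x - prev) ^ 2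

theorem pvLoopA_nil (ng : List Int) (curr ans : Int) :
    pvLoopA [] ng curr ans = ans + pvSumSq curr ng := by
  induction ng generalizing curr ans with
  | nil => simp [pvLoopA, pvSumSq]
  | cons k ks ih => simp [pvLoopA, pvSumSq, ih]; ring

theorem pvLoopA_eq_sumSq (mg ng : List Int) (curr ans : Int) :
    pvLoopA mg ng curr ans = ans + pvSumSq curr (pvIlv mg ng) := by
  induction mg generalizing ng curr ans with
  | nil => simpa [pvIlv] using pvLoopA_nil ng curr ans
  | cons m ms ih =>
    cases ng with
    | nil => simp [pvLoopA, pvIlv, pvSumSq, ih]; ring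
    | cons k ks => simp [pvLoopA, pvIlv, pvSumSq, ih]; ring

-- the zigzag sum decomposes into the head square and the two families of pair gaps
theorem pvIlv_sum (b f : List Int) (prev : Int)
    (h1 : b.length ≤ f.length) (h2 : f.length ≤ b.length + 1) :
    pvSumSq prev (pvIlv f b)
      = pvHd f prev + pvS (f.zip b) + pvS (f.tail.zip b) := by
  induction b generalizing f prev with
  | nil =>
    cases f with
    | nil => simp [pvIlv, pvSumSq, pvS, pvHd]
    | cons x xs =>
      have hxs : xs = [] := by cases xs with | nil => rfl | cons a as => simp at h2
      subst hxs; simp [pvIlv, pvSumSq, pvS, pvHd]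
  | cons y ys ih =>
    cases f with
    | nil => simp at h1
    | cons x xs =>
      have h1' : ys.length ≤ xs.length := by simpa using h1
      have h2' : xs.length ≤ ys.length + 1 := by simpa using h2
      have hrec := ih xs y h1' h2'
      cases xs with
      | nil =>
        have : ys = [] := by cases ys with | nil => rfl | cons a as => simp at h1'
        subst this; simp [pvIlv, pvSumSq, pvS, pvHd]; ring
      | cons x' xs' =>
        simp only [pvIlv, pvSumSq] at hrec ⊢
        rw [hrec]
        simp [pvS, pvHd]; ring

-- the map over range(0, m) of xs[i] defaults is take m (for m ≤ len)
theorem pvMap_pyRange_take (xs : List Int) (m : Nat) (hm : m ≤ xs.length) :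
    (PySem.List.pyRange 0 (m : Int) 1).map (fun j => PySem.List.pyGetD xs j 0) = xs.take m := by
  have hsplit := PySem.List.pyRange_one_append 0 (m : Int) (xs.length : Int)
    (Int.natCast_nonneg m) (by exact_mod_cast hm)
  have hall : (PySem.List.pyRange 0 (xs.length : Int) 1).map (fun j => PySem.List.pyGetD xs j 0) = xs :=
    PySem.List.map_pyGetD_pyRange_zero' xs 0
  have hdrop : (PySem.List.pyRange (m : Int) (xs.length : Int) 1).map (fun j => PySem.List.pyGetD xs j 0)
      = xs.drop m := by
    have := PySem.List.map_pyGetD_pyRange' xs 0 (a := (m : Int)) (Int.natCast_nonneg m)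
    simpa using this
  have hcat : xs.take m ++ xs.drop m
      = ((PySem.List.pyRange 0 (m : Int) 1).map (fun j => PySem.List.pyGetD xs j 0)) ++ xs.drop m := by
    rw [List.take_append_drop]
    conv_lhs => rw [← hall]
    rw [hsplit, List.map_append, hdrop]
  exact (List.append_cancel_right hcat.symm)

theorem maxCaloriesBurnt_eq (heights : List Int) :
    maxCaloriesBurnt heights = maxCaloriesBurnt_alt heights := by
  unfold maxCaloriesBurnt maxCaloriesBurnt_alt
  set s := PySem.List.sorted heights (fun x => x) true with hsdef
  have hlen : s.length = heights.length := PySem.List.length_sorted heights _ true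
  set n : Nat := heights.length with hn
  set m : Nat := (n + 1) / 2 with hmdef
  -- A's maxim_size is ⌈n/2⌉
  have hms : (if PySem.Int.mod (n : Int) 2 = 0 then PySem.Int.floordiv (n : Int) 2
      else PySem.Int.floordiv (n : Int) 2 + 1) = ((m : Nat) : Int) := by
    rw [PySem.Int.mod_eq_emod_of_pos (by norm_num), PySem.Int.floordiv_eq_ediv_of_pos (by norm_num)]
    split_ifs with h <;> omega
  have hmle : m ≤ s.length := by rw [hlen]; omega
  -- A's two groups are take m and drop m of s
  have hmax : (PySem.List.pyRange 0 ((m : Nat) : Int) 1).foldl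
      (fun acc i => acc ++ [PySem.List.pyGetD s i 0]) [] = s.take m := by
    rw [PySem.List.foldl_append_singleton_eq_map, List.nil_append]
    exact pvMap_pyRange_take s m hmle
  have hmin : (PySem.List.pyRange ((m : Nat) : Int) ((n : Nat) : Int) 1).foldl
      (fun acc i => acc ++ [PySem.List.pyGetD s i 0]) [] = s.drop m := by
    rw [PySem.List.foldl_append_singleton_eq_map, List.nil_append]
    have := PySem.List.map_pyGetD_pyRange' s 0 (a := (m : Int)) (Int.natCast_nonneg m)
    rw [hlen] at this
    simpa using this
  -- s is descending, so A's re-sort of the dropped tail ascending is reversing it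
  have hdesc : s.Pairwise (fun a b => b ≤ a) := by
    simpa using PySem.List.sorted_pairwise_rev heights (fun x => x)
  have hrevle : (s.drop m).reverse.Pairwise (fun a b => a ≤ b) := by
    rw [List.pairwise_reverse]
    exact (hdesc.sublist (List.drop_sublist m s))
  have hsortmin : PySem.List.sorted (s.drop m) (fun x => x) false = (s.drop m).reverse :=
    PySem.List.sorted_id_eq_of_perm_of_pairwise _ _ (s.drop m).reverse_perm hrevle
  simp only [hms, hmax, hmin, hsortmin]
  rw [pvLoopA_eq_sumSq]
  set f := s.take m with hfdef
  set b := (s.drop m).reverse with hbdef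
  have hflen : f.length = m := by rw [hfdef, List.length_take]; omega
  have hblen : b.length = n - m := by rw [hbdef, List.length_reverse, List.length_drop, hlen]
  by_cases hzero : n = 0
  · have hs0 : s = [] := List.eq_nil_of_length_eq_zero (by omega)
    have hf0 : f = [] := by rw [hfdef, hs0]; simp
    have hb0 : b = [] := by rw [hbdef, hs0]; simp
    rw [hf0, hb0, hs0]
    simp [pvIlv, pvSumSq]
  · -- n ≥ 1 : B's if-branch is the non-zero one
    have hpos : 1 ≤ n := Nat.one_le_iff_ne_zero.mpr hzero
    have hne : ((s.length : Int) ≠ 0) := by rw [hlen]; exact_mod_cast hzero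
    rw [if_neg hne]
    -- the two floordivs are n/2 and (n-1)/2 as Nat
    set q : Nat := n / 2 with hqdef
    set r : Nat := (n - 1) / 2 with hrdef
    have hq : PySem.Int.floordiv ((s.length : Int)) 2 = ((q : Nat) : Int) := by
      rw [PySem.Int.floordiv_eq_ediv_of_pos (by norm_num), hlen]; omega
    have hr : PySem.Int.floordiv ((s.length : Int) - 1) 2 = ((r : Nat) : Int) := by
      rw [PySem.Int.floordiv_eq_ediv_of_pos (by norm_num), hlen]; omega
    rw [hq, hr]
    -- turn the two folds into sums via foldl_add
    rw [PySem.List.foldl_add, PySem.List.foldl_add]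
    -- first mapped range equals the (j, n-1-j) pair gaps
    have hmap1 : (PySem.List.pyRange 0 ((q : Nat) : Int) 1).map
        (fun j => (PySem.List.pyGetD s j 0 - PySem.List.pyGetD s ((s.length : Int) - 1 - j) 0) ^ 2)
        = (f.zip b).map (fun p => (p.1 - p.2) ^ 2) := by
      rw [hfdef, hbdef]
      apply List.ext_getElem
      · simp [PySem.List.length_pyRange_one, hlen]; omega
      · intro i hi1 hi2
        have hiq : i < q := by
          simpa [PySem.List.length_pyRange_one] using hi1
        have hin : i < s.length := by rw [hlen]; omega
        have hbn : n - 1 - i < s.length := by rw [hlen]; omega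
        rw [List.getElem_map, List.getElem_map, PySem.List.getElem_pyRange_one]
        have e1 : PySem.List.pyGetD s ((i : Nat) : Int) 0 = s[i] := by
          rw [PySem.List.pyGetD_natCast, List.getD_eq_getElem?_getD, List.getElem?_eq_getElem hin]
          rfl
        have ecast : ((s.length : Int) - 1 - ((i : Nat) : Int)) = ((n - 1 - i : Nat) : Int) := by
          rw [hlen]; omega
        have e2 : PySem.List.pyGetD s ((s.length : Int) - 1 - ((i : Nat) : Int)) 0 = s[n - 1 - i] := by
          rw [ecast, PySem.List.pyGetD_natCast, List.getD_eq_getElem?_getD,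
            List.getElem?_eq_getElem hbn]
          rfl
        simp only [zero_add, e1, e2, List.getElem_zip, List.getElem_take,
          List.getElem_reverse, List.getElem_drop, List.length_drop]
        have hidx : m + (s.length - m - 1 - i) = n - 1 - i := by rw [hlen]; omega
        simp only [hidx]
    -- second mapped range equals the (j+1, n-1-j) pair gaps
    have hmap2 : (PySem.List.pyRange 0 ((r : Nat) : Int) 1).map
        (fun j => (PySem.List.pyGetD s (j + 1) 0 - PySem.List.pyGetD s ((s.length : Int) - 1 - j) 0) ^ 2)
        = (f.tail.zip b).map (fun p => (p.1 - p.2) ^ 2) := by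
      rw [hfdef, hbdef]
      apply List.ext_getElem
      · simp [PySem.List.length_pyRange_one, hlen]; omega
      · intro i hi1 hi2
        have hir : i < r := by
          simpa [PySem.List.length_pyRange_one] using hi1
        have hin : i + 1 < s.length := by rw [hlen]; omega
        have hbn : n - 1 - i < s.length := by rw [hlen]; omega
        rw [List.getElem_map, List.getElem_map, PySem.List.getElem_pyRange_one]
        have ecast1 : (((i : Nat) : Int) + 1) = ((i + 1 : Nat) : Int) := by omega
        have e1 : PySem.List.pyGetD s (((i : Nat) : Int) + 1) 0 = s[i + 1] := by
          rw [ecast1, PySem.List.pyGetD_natCast, List.getD_eq_getElem?_getD,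
            List.getElem?_eq_getElem hin]
          rfl
        have ecast : ((s.length : Int) - 1 - ((i : Nat) : Int)) = ((n - 1 - i : Nat) : Int) := by
          rw [hlen]; omega
        have e2 : PySem.List.pyGetD s ((s.length : Int) - 1 - ((i : Nat) : Int)) 0 = s[n - 1 - i] := by
          rw [ecast, PySem.List.pyGetD_natCast, List.getD_eq_getElem?_getD,
            List.getElem?_eq_getElem hbn]
          rfl
        simp only [zero_add, e1, e2, List.getElem_zip, List.getElem_tail, List.getElem_take,
          List.getElem_reverse, List.getElem_drop, List.length_drop]
        have hidx : m + (s.length - m - 1 - i) = n - 1 - i := by rw [hlen]; omega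
        simp only [hidx]
    rw [hmap1, hmap2]
    -- now apply the zigzag decomposition
    have hl1 : b.length ≤ f.length := by rw [hflen, hblen]; omega
    have hl2 : f.length ≤ b.length + 1 := by rw [hflen, hblen]; omega
    rw [pvIlv_sum b f 0 hl1 hl2]
    -- head of f is s[0]
    have hsne : s ≠ [] := by
      intro h; rw [h] at hlen; simp at hlen; omega
    obtain ⟨x, xs, hfx⟩ : ∃ x xs, f = x :: xs := by
      cases hf : f with
      | nil => exfalso; rw [hf] at hflen; simp at hflen; omega
      | cons x xs => exact ⟨x, xs, rfl⟩
    have hx : x = s[0]'(by omega) := by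
      have h0 : f[0]'(by rw [hflen]; omega) = x := by simp [hfx]
      exact h0.symm.trans (List.getElem_take ..)
    have hget0 : PySem.List.pyGetD s 0 0 = s[0]'(by omega) := by
      rw [PySem.List.pyGetD_zero, List.getD_eq_getElem?_getD, List.getElem?_eq_getElem (by omega)]
      rfl
    rw [hfx, hget0]
    simp only [pvS, pvHd, hx]
    ring

-- ===== VERDICT (by name: the statement is the Claim_ definition above) =====
theorem maxCaloriesBurnt_spec : Claim_equal_maxCaloriesBurnt := by
  intro heights _
  unfold Spec_maxCaloriesBurnt
  exact maxCaloriesBurnt_eq heights
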